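-- pv_equiv track=rewrite | github.com/ArnavSharma938/LatentGlue | src/validation/full_eval.py | smiles_atom_spans
-- ===== SOURCE A (Python) =====
-- def smiles_atom_spans(smiles):
--     spans = []
--     i = 0
--     two_char_atoms = {"Al", "Br", "Ca", "Cl", "Li", "Na", "Se", "Si"}
--     single_char_atoms = set("BCFNOPSIbcnops")
--     while i < len(smiles):
--         ch = smiles[i]
--         if ch == "[":
--             end = smiles.find("]", i)
--             if end < 0:
--                 raise ValueError(f"Unclosed bracket atom in SMILES: {smiles}")
--             spans.append((i, end + 1))
--             i = end + 1
--             continue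
--         if i + 1 < len(smiles) and smiles[i : i + 2] in two_char_atoms:
--             spans.append((i, i + 2))
--             i += 2
--             continue
--         if ch in single_char_atoms:
--             spans.append((i, i + 1))
--         i += 1
--     return spans
-- ===== SOURCE B (Python) =====
-- import re
--
-- _ATOM_RE = re.compile(r"\[[^\]]*\]|Al|Br|Ca|Cl|Li|Na|Se|Si|[BCFNOPSIbcnops]|\[")
--
-- def smiles_atom_spans(smiles):
--     spans = []
--     for m in _ATOM_RE.finditer(smiles):
--         if m.group() == "[":
--             raise ValueError(f"Unclosed bracket atom in SMILES: {smiles}")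
--         spans.append((m.start(), m.end()))
--     return spans
-- ===== Notes on version B (the rewrite author's own statement) =====
-- stated objective: idiomatic
-- what changed: Replaced the manual index-advancing while-loop (with explicit find/slice/set lookups) by a single compiled regex alternation iterated with re.finditer, with a bare-'[' fallback alternative reproducing the unclosed-bracket ValueError.
import Mathlib
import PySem

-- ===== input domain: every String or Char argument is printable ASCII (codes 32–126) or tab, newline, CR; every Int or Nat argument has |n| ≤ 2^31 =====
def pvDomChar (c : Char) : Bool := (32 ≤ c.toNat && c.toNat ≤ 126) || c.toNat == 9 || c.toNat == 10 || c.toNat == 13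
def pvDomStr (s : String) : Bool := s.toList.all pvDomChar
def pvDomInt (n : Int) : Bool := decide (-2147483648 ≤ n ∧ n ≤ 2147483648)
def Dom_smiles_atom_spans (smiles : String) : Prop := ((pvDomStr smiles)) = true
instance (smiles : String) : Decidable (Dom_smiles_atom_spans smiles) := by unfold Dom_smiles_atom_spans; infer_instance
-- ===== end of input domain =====

-- B replaces A's manual index-advancing scan by a single regex alternation iterated with
-- finditer (objective: idiomatic). Equivalence of return values on Pre_ (no unclosed '[').

-- ===== PORT A =====
-- A's two_char_atoms set (membership test on a literal set of strings)
def pvTwoA : List String := ["Al", "Br", "Ca", "Cl", "Li", "Na", "Se", "Si"]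
-- A's single_char_atoms = set("BCFNOPSIbcnops")
def pvSinglesA : List Char := ['B','C','F','N','O','P','S','I','b','c','n','o','p','s']

-- transliteration of Python str.find for a single character, searching from the front:
-- smiles.find("]", i) on the remaining suffix; some k = relative index, none = -1 (not found)
def pvFindA : List Char → Char → Option Nat
  | [], _ => none
  | d :: rest, c => if d = c then some 0 else (pvFindA rest c).map (· + 1)

-- A's while-loop: l is the remaining suffix smiles[i:], i the current absolute index
def pvGoA : List Char → Int → List (Int × Int)
  | [], _ => []
  | c :: rest, i =>
    if c = '[' then
      match pvFindA rest ']' with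
      | none => []   -- Python A raises ValueError here; excluded by Pre_
      | some k => (i, i + (k : Int) + 2) :: pvGoA (rest.drop (k + 1)) (i + (k : Int) + 2)
    else
      match h : rest with
      | d :: rest2 =>
        if String.ofList [c, d] ∈ pvTwoA then (i, i + 2) :: pvGoA rest2 (i + 2)
        else if c ∈ pvSinglesA then (i, i + 1) :: pvGoA rest (i + 1)
        else pvGoA rest (i + 1)
      | [] =>   -- i + 1 < len fails: only the single-char test remains, then the loop ends
        if c ∈ pvSinglesA then [(i, i + 1)] else []
termination_by l => l.length
decreasing_by all_goals (simp_all [List.length_drop]; try omega)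

def smiles_atom_spans (smiles : String) : List (Int × Int) := pvGoA smiles.toList 0

-- ===== PORT B =====
-- the regex alternation r"\[[^\]]*\]|Al|Br|Ca|Cl|Li|Na|Se|Si|[BCFNOPSIbcnops]|\[",
-- alternatives tried in order at one position; returns (match length, is-bare-'[')
def pvTwoB : List String := ["Al", "Br", "Ca", "Cl", "Li", "Na", "Se", "Si"]
def pvSinglesB : List Char := ['B','C','F','N','O','P','S','I','b','c','n','o','p','s']

def pvMatchAt : List Char → Option (Nat × Bool)
  | [] => none
  | c :: rest =>
    if c = '[' then
      if ']' ∈ rest then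
        -- \[[^\]]*\] : '[' then the ']'-free run then ']'
        some ((rest.takeWhile (· ≠ ']')).length + 2, false)
      else some (1, true)    -- final bare \[ alternative
    else if (match rest with | d :: _ => decide (String.ofList [c, d] ∈ pvTwoB) | [] => false) then
      some (2, false)
    else if c ∈ pvSinglesB then some (1, false)
    else none

-- re.finditer: leftmost matches, scanning resumes after each match (or one char on if no match)
def pvGoB : List Char → Int → List (Int × Int)
  | [], _ => []
  | c :: tail, pos =>
    match pvMatchAt (c :: tail) with
    | some (n, false) =>
      -- (c :: tail).drop n = tail.drop (n-1) since n ≥ 1 (every alternative is nonempty)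
      (pos, pos + (n : Int)) :: pvGoB (tail.drop (n - 1)) (pos + (n : Int))
    | some (_, true) => []   -- m.group() == "[" : Python B raises ValueError; excluded by Pre_
    | none => pvGoB tail (pos + 1)
termination_by l => l.length
decreasing_by all_goals (simp [List.length_drop]; try omega)

def smiles_atom_spans_alt (smiles : String) : List (Int × Int) := pvGoB smiles.toList 0

-- ===== PRECONDITION & SPEC =====
-- Pre_ excludes exactly the strings with an unclosed bracket atom (a '[' after the last ']'),
-- on which Python A raises ValueError.
def Pre_smiles_atom_spans (smiles : String) : Prop :=
  '[' ∉ smiles.toList.reverse.takeWhile (· ≠ ']')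
instance (smiles : String) : Decidable (Pre_smiles_atom_spans smiles) := by
  unfold Pre_smiles_atom_spans; infer_instance

def pvWitness_smiles_atom_spans : String := "C[NH4+]Cl"

def Spec_smiles_atom_spans (smiles : String) (out : List (Int × Int)) : Prop := out = smiles_atom_spans_alt smiles
instance (smiles : String) (out : List (Int × Int)) : Decidable (Spec_smiles_atom_spans smiles out) := by unfold Spec_smiles_atom_spans; infer_instance

-- ===== CLAIM (what is proved, stated in full; the proofs are below) =====
def Claim_equal_smiles_atom_spans : Prop := ∀ (smiles : String), Dom_smiles_atom_spans smiles → Pre_smiles_atom_spans smiles → Spec_smiles_atom_spans smiles (smiles_atom_spans smiles)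

-- ===== LEMMAS AND PROOFS =====

-- semantic invariant the scan preserves: every suffix containing '[' also contains ']'
def pvGood (l : List Char) : Prop := ∀ p : List Char, p <:+ l → '[' ∈ p → ']' ∈ p

theorem pvGood_suffix {l m : List Char} (h : pvGood l) (hs : m <:+ l) : pvGood m :=
  fun p hp hin => h p (hp.trans hs) hin

-- a ']'-free prefix of m is contained in m.takeWhile (· ≠ ']')
theorem pvMem_takeWhile_of_prefix {q m : List Char} (hq : q <+: m)
    (hfree : ']' ∉ q) (hin : '[' ∈ q) : '[' ∈ m.takeWhile (fun c => c ≠ ']') := by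
  induction q generalizing m with
  | nil => simp at hin
  | cons a q' ih =>
    obtain ⟨t, rfl⟩ := hq
    have ha : a ≠ ']' := by intro h; exact hfree (by simp [h])
    simp only [List.cons_append, List.takeWhile_cons,
      decide_eq_true_eq, if_pos ha, List.mem_cons] at *
    rcases hin with h | h
    · exact Or.inl h
    · exact Or.inr (ih ⟨t, rfl⟩ (fun hh => hfree (Or.inr hh)) h)

theorem pvPre_good (smiles : String) (h : Pre_smiles_atom_spans smiles) :
    pvGood smiles.toList := by
  intro p hp hin
  by_contra hnot
  apply h
  have hpref : p.reverse <+: smiles.toList.reverse := List.reverse_prefix.mpr hp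
  have : '[' ∈ smiles.toList.reverse.takeWhile (fun c => c ≠ ']') :=
    pvMem_takeWhile_of_prefix hpref (by simpa using hnot) (by simpa using hin)
  simpa using this

-- pvFindA computes the length of the ']'-free run when ']' is present
theorem pvFindA_eq_takeWhile (l : List Char) (h : ']' ∈ l) :
    pvFindA l ']' = some ((l.takeWhile (· ≠ ']')).length) := by
  induction l with
  | nil => simp at h
  | cons d rest ih =>
    by_cases hd : d = ']'
    · simp [pvFindA, hd]
    · have hr : ']' ∈ rest := by
        rcases List.mem_cons.mp h with h1 | h1
        · exact absurd h1.symm hd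
        · exact h1
      simp [pvFindA, hd, ih hr]

-- the core equivalence on suffixes, under the invariant
theorem pvGo_eq (l : List Char) (hg : pvGood l) (i : Int) : pvGoA l i = pvGoB l i := by
  induction hn : l.length using Nat.strong_induction_on generalizing l i with
  | _ n ih =>
  match l, hg with
  | [], _ => simp [pvGoA, pvGoB]
  | c :: rest, hg =>
    by_cases hc : c = '['
    · -- bracket atom
      subst hc
      have hmem : ']' ∈ '[' :: rest := hg _ (List.suffix_refl _) (by simp)
      have hr : ']' ∈ rest := by
        rcases List.mem_cons.mp hmem with h1 | h1
        · exact absurd h1 (by decide)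
        · exact h1
      have hfind := pvFindA_eq_takeWhile rest hr
      set k := (rest.takeWhile (· ≠ ']')).length with hk
      have hrec : pvGoA (rest.drop (k + 1)) (i + (k : Int) + 2)
          = pvGoB (rest.drop (k + 1)) (i + (k : Int) + 2) := by
        apply ih (rest.drop (k + 1)).length
        · subst hn; simp only [List.length_drop, List.length_cons]; omega
        · exact pvGood_suffix hg ((List.drop_suffix _ _).trans (List.suffix_cons _ _))
        · rfl
      rw [pvGoA.eq_def, pvGoB.eq_def]
      simp only [pvMatchAt, hr, if_pos, hfind, ← hk]
      have e2 : i + ((k : Int) + 2) = i + (k : Int) + 2 := by ring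
      simp [hrec, e2]
    · -- non-bracket position
      have etwo : pvTwoB = pvTwoA := rfl
      have esng : pvSinglesB = pvSinglesA := rfl
      match rest with
      | d :: rest2 =>
        by_cases h2 : String.ofList [c, d] ∈ pvTwoA
        · have hrec : pvGoA rest2 (i + 2) = pvGoB rest2 (i + 2) := by
            apply ih rest2.length
            · subst hn; simp only [List.length_cons]; omega
            · exact pvGood_suffix hg ((List.suffix_cons _ _).trans (List.suffix_cons _ _))
            · rfl
          rw [pvGoA.eq_def, pvGoB.eq_def]
          simp [hc, pvMatchAt, etwo, h2, hrec]
        · have hrec : pvGoA (d :: rest2) (i + 1) = pvGoB (d :: rest2) (i + 1) := by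
            apply ih (d :: rest2).length
            · subst hn; simp only [List.length_cons]; omega
            · exact pvGood_suffix hg (List.suffix_cons _ _)
            · rfl
          by_cases hs : c ∈ pvSinglesA
          · rw [pvGoA.eq_def, pvGoB.eq_def]
            simp [hc, pvMatchAt, etwo, esng, h2, hs, hrec]
          · rw [pvGoA.eq_def, pvGoB.eq_def]
            simp [hc, pvMatchAt, etwo, esng, h2, hs, hrec]
      | [] =>
        by_cases hs : c ∈ pvSinglesA
        · rw [pvGoA.eq_def, pvGoB.eq_def]
          simp [hc, pvMatchAt, esng, hs, pvGoB]
        · rw [pvGoA.eq_def, pvGoB.eq_def]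
          simp [hc, pvMatchAt, esng, hs, pvGoB]

-- ===== VERDICT (by name: the statement is the Claim_ definition above) =====
theorem smiles_atom_spans_spec : Claim_equal_smiles_atom_spans := by
  intro smiles _ hpre
  unfold Spec_smiles_atom_spans smiles_atom_spans smiles_atom_spans_alt
  exact pvGo_eq smiles.toList (pvPre_good smiles hpre) 0
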